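-- pv_equiv track=rewrite | github.com/gezmi/af_scripts | run_mmseqs2.py | split_msa_vertically
-- ===== SOURCE A (Python) =====
-- def split_input_by_chains(sequence, lengths):
-- 	result = []
-- 	current_pos = 0
--
-- 	for target_length in lengths:
-- 		chain_seq = ""
-- 		actual_length = 0
--
-- 		# Keep adding characters until we reach the target length for this chain
-- 		while actual_length < target_length and current_pos < len(sequence):
-- 			char = sequence[current_pos]
-- 			chain_seq += char
--
-- 			# Only count uppercase letters toward the actual length
-- 			if not char.islower():
-- 				actual_length += 1
--
-- 			current_pos += 1
--
-- 		result.append(chain_seq)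
--
-- 	return result
--
-- def split_msa_vertically(chains, dummy_chain_names, a3m_lines):
-- 	# create dictionary for each chain
-- 	dict_a3m_per_chain = {chain: [] for i, chain in enumerate(dummy_chain_names)}
--
-- 	for line in a3m_lines:
-- 		if line.startswith('>'):
-- 			[dict_a3m_per_chain[chain].append(line) for chain in dummy_chain_names]
-- 		else:
-- 			# split the line into the corresponding chains
-- 			split_sequences = split_input_by_chains(line.strip(), chains)
--
-- 			for i, chain in enumerate(dummy_chain_names):
-- 				dict_a3m_per_chain[chain].append(split_sequences[i])
--
-- 	return dict_a3m_per_chain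
-- ===== SOURCE B (Python) =====
-- def split_input_by_chains(sequence, lengths):
-- 	# index-first: positions of the counted (non-lowercase) characters, then prefix sums
-- 	upper = [i for i, c in enumerate(sequence) if not c.islower()]
-- 	parts = []
-- 	start = 0
-- 	cum = 0
-- 	for target_length in lengths:
-- 		cum += max(target_length, 0)
-- 		if cum == 0:
-- 			end = start
-- 		elif cum <= len(upper):
-- 			end = upper[cum - 1] + 1
-- 		else:
-- 			end = len(sequence)
-- 		parts.append(sequence[start:end])
-- 		start = end
-- 	return parts
--
-- def split_msa_vertically(chains, dummy_chain_names, a3m_lines):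
-- 	dict_a3m_per_chain = {chain: [] for chain in dummy_chain_names}
-- 	for line in a3m_lines:
-- 		if line.startswith('>'):
-- 			for chain in dummy_chain_names:
-- 				dict_a3m_per_chain[chain].append(line)
-- 		else:
-- 			split_sequences = split_input_by_chains(line.strip(), chains)
-- 			for i, chain in enumerate(dummy_chain_names):
-- 				dict_a3m_per_chain[chain].append(split_sequences[i])
-- 	return dict_a3m_per_chain
-- ===== Notes on version B (the rewrite author's own statement) =====
-- stated objective: alternative
-- what changed: The character-by-character while-loop splitter is replaced by an index-first slicer: collect the non-lowercase positions once, then cut the sequence by slicing at cumulative counts.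
import Mathlib
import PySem

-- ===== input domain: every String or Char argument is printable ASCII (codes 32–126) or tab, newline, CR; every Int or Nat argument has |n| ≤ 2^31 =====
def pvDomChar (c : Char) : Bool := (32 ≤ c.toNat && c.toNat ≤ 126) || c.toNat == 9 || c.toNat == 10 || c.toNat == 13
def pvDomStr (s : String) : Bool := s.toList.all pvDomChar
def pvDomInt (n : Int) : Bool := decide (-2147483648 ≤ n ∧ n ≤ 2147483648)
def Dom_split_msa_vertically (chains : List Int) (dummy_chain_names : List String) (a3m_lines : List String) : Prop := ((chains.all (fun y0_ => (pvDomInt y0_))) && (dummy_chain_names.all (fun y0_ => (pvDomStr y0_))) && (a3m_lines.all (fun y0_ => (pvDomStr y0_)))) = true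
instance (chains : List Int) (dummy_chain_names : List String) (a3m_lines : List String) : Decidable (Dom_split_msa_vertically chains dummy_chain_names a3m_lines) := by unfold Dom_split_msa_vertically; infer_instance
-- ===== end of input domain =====

-- B replaces A's char-by-char while-loop splitter by an index-first slicer (non-lowercase
-- positions collected once, cut by slicing at cumulative counts); alternative decomposition, same cost.


-- ===== PORT A =====
-- "not char.islower()" — the characters that count toward a chain's length (shared predicate)
def pvCounted (c : Char) : Bool := !(PySem.Chars.islower c)

-- the inner while loop of split_input_by_chains (state: current_pos, actual_length, chain_seq)
def pvWhileA (seq : List Char) (target : Int) (pos : Nat) (actual : Int) (acc : List Char) :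
    List Char × Nat :=
  if h : actual < target ∧ pos < seq.length then
    pvWhileA seq target (pos + 1)
      (if pvCounted (seq[pos]'h.2) then actual + 1 else actual) (acc ++ [seq[pos]'h.2])
  else (acc, pos)
termination_by seq.length - pos
decreasing_by omega

def split_input_by_chains (sequence : List Char) (lengths : List Int) : List (List Char) :=
  (lengths.foldl (fun (st : List (List Char) × Nat) target_length =>
      let r := pvWhileA sequence target_length st.2 0 []
      (st.1 ++ [r.1], r.2)) ([], 0)).1

def split_msa_vertically (chains : List Int) (dummy_chain_names : List String) (a3m_lines : List String) : List (String × List String) :=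
  let d0 : PySem.Dict String (List String) :=
    dummy_chain_names.foldl (fun d chain => d.insert chain []) PySem.Dict.empty
  (a3m_lines.foldl (fun d line =>
    if PySem.Str.startswith line ">" then
      dummy_chain_names.foldl (fun d chain => d.modify chain [] (fun l => l ++ [line])) d
    else
      let split_sequences := split_input_by_chains (PySem.Str.strip line).toList chains
      (PySem.List.enumerate dummy_chain_names).foldl
        (fun d p => d.modify p.2 [] (fun l => l ++ [String.ofList (PySem.List.pyGetD split_sequences p.1 [])])) d) d0).items

-- ===== PORT B =====
def split_input_by_chains_alt (sequence : List Char) (lengths : List Int) : List (List Char) :=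
  let upper : List Int :=
    ((PySem.List.enumerate sequence).filter (fun p => pvCounted p.2)).map (·.1)
  (lengths.foldl (fun (st : List (List Char) × Int × Int) target_length =>
      let cum := st.2.2 + max target_length 0
      let e : Int :=
        if cum = 0 then st.2.1
        else if cum ≤ (upper.length : Int) then PySem.List.pyGetD upper (cum - 1) 0 + 1
        else (sequence.length : Int)
      (st.1 ++ [PySem.List.slice sequence (some st.2.1) (some e)], e, cum)) ([], 0, 0)).1

def split_msa_vertically_alt (chains : List Int) (dummy_chain_names : List String) (a3m_lines : List String) : List (String × List String) :=
  let d0 : PySem.Dict String (List String) :=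
    dummy_chain_names.foldl (fun d chain => d.insert chain []) PySem.Dict.empty
  (a3m_lines.foldl (fun d line =>
    if PySem.Str.startswith line ">" then
      dummy_chain_names.foldl (fun d chain => d.modify chain [] (fun l => l ++ [line])) d
    else
      let split_sequences := split_input_by_chains_alt (PySem.Str.strip line).toList chains
      (PySem.List.enumerate dummy_chain_names).foldl
        (fun d p => d.modify p.2 [] (fun l => l ++ [String.ofList (PySem.List.pyGetD split_sequences p.1 [])])) d) d0).items

-- ===== PRECONDITION & SPEC =====
-- Pre_ excludes exactly the inputs on which both A and B raise IndexError: more chain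
-- names than chain lengths together with at least one sequence (non-'>') line.
def Pre_split_msa_vertically (chains : List Int) (dummy_chain_names : List String) (a3m_lines : List String) : Prop :=
  (∀ line ∈ a3m_lines, PySem.Str.startswith line ">" = true) ∨
    dummy_chain_names.length ≤ chains.length
instance (chains : List Int) (dummy_chain_names : List String) (a3m_lines : List String) : Decidable (Pre_split_msa_vertically chains dummy_chain_names a3m_lines) := by unfold Pre_split_msa_vertically; infer_instance

def pvWitness_split_msa_vertically : List Int × List String × List String :=
  ([1, 2], ["A", "B"], [">q", "ABab C"])

def Spec_split_msa_vertically (chains : List Int) (dummy_chain_names : List String) (a3m_lines : List String) (out : List (String × List String)) : Prop := out = split_msa_vertically_alt chains dummy_chain_names a3m_lines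
instance (chains : List Int) (dummy_chain_names : List String) (a3m_lines : List String) (out : List (String × List String)) : Decidable (Spec_split_msa_vertically chains dummy_chain_names a3m_lines out) := by unfold Spec_split_msa_vertically; infer_instance

-- ===== CLAIM (what is proved, stated in full; the proofs are below) =====
def Claim_equal_split_msa_vertically : Prop := ∀ (chains : List Int) (dummy_chain_names : List String) (a3m_lines : List String), Dom_split_msa_vertically chains dummy_chain_names a3m_lines → Pre_split_msa_vertically chains dummy_chain_names a3m_lines → Spec_split_msa_vertically chains dummy_chain_names a3m_lines (split_msa_vertically chains dummy_chain_names a3m_lines)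

-- ===== LEMMAS AND PROOFS =====

-- position right after the k-th counted character of seq (seq.length if there are fewer than k)
def idxAfter : List Char → Nat → Nat
  | _, 0 => 0
  | [], _ + 1 => 0
  | c :: rest, k + 1 => 1 + idxAfter rest (if pvCounted c then k else k + 1)

-- positions (0-based) of the counted characters of seq
def upperN : List Char → List Nat
  | [] => []
  | c :: rest => if pvCounted c then 0 :: (upperN rest).map (· + 1) else (upperN rest).map (· + 1)

theorem idxAfter_le (seq : List Char) (k : Nat) : idxAfter seq k ≤ seq.length := by
  induction seq generalizing k with
  | nil => cases k <;> simp [idxAfter]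
  | cons c rest ih =>
    cases k with
    | zero => simp [idxAfter]
    | succ k =>
      simp only [idxAfter, List.length_cons]
      have := ih (if pvCounted c then k else k + 1); omega

theorem idxAfter_add (seq : List Char) (c k : Nat) :
    idxAfter seq (c + k) = idxAfter seq c + idxAfter (seq.drop (idxAfter seq c)) k := by
  induction seq generalizing c with
  | nil => cases c <;> cases k <;> simp [idxAfter]
  | cons ch rest ih =>
    cases c with
    | zero => simp [idxAfter]
    | succ c =>
      have h1 : c + 1 + k = (c + k) + 1 := by omega
      rw [h1]
      simp only [idxAfter]
      have hd : ∀ j : Nat, List.drop (1 + j) (ch :: rest) = List.drop j rest := by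
        intro j; rw [Nat.add_comm]; simp
      by_cases hc : pvCounted ch
      · simp only [hc, if_true, hd, ih]; omega
      · simp only [hc, Bool.false_eq_true, if_false, hd]
        have h3 : c + k + 1 = (c + 1) + k := by omega
        rw [h3, ih]; omega

theorem upperN_enum (seq : List Char) (s : Int) :
    ((PySem.List.enumerate seq s).filter (fun p => pvCounted p.2)).map (·.1)
      = List.map (fun n : Nat => s + (n : Int)) (upperN seq) := by
  induction seq generalizing s with
  | nil => simp [upperN, PySem.List.enumerate_nil]
  | cons c rest ih =>
    have hcast : List.map (fun n : Nat => s + (n : Int)) ((upperN rest).map (· + 1))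
        = List.map (fun n : Nat => (s + 1) + (n : Int)) (upperN rest) := by
      rw [List.map_map]
      refine List.map_congr_left fun a _ => ?_
      simp only [Function.comp_apply]; push_cast; ring
    rw [PySem.List.enumerate_cons]
    by_cases hc : pvCounted c
    · rw [List.filter_cons_of_pos (by simpa using hc), List.map_cons, ih]
      simp only [upperN, hc, if_true, List.map_cons, hcast]
      simp
    · rw [List.filter_cons_of_neg (by simpa using hc), ih]
      simp only [upperN, hc, Bool.false_eq_true, if_false, hcast]

theorem idxAfter_hit (seq : List Char) (c : Nat) (h1 : 1 ≤ c) (h2 : c ≤ (upperN seq).length) :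
    idxAfter seq c = (upperN seq).getD (c - 1) 0 + 1 := by
  induction seq generalizing c with
  | nil => simp [upperN] at h2; omega
  | cons ch rest ih =>
    obtain ⟨c, rfl⟩ : ∃ c', c = c' + 1 := ⟨c - 1, by omega⟩
    simp only [idxAfter]
    by_cases hc : pvCounted ch
    · simp only [upperN, hc, if_true] at h2 ⊢
      cases c with
      | zero => simp [idxAfter]
      | succ c =>
        simp only [List.length_cons, List.length_map] at h2
        rw [ih (c + 1) (by omega) (by simp; omega)]
        have hlt : c < (upperN rest).length := by omega
        simp only [Nat.add_sub_cancel, List.getD_eq_getElem?_getD, List.getElem?_cons_succ,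
          List.getElem?_map]
        rw [List.getElem?_eq_getElem hlt]
        simp; omega
    · simp only [upperN, hc, Bool.false_eq_true, if_false] at h2 ⊢
      simp only [List.length_map] at h2
      rw [ih (c + 1) (by omega) (by omega)]
      have hlt : c < (upperN rest).length := by omega
      simp only [Nat.add_sub_cancel, List.getD_eq_getElem?_getD, List.getElem?_map]
      rw [List.getElem?_eq_getElem hlt]
      simp; omega

theorem idxAfter_miss (seq : List Char) (c : Nat) (h : (upperN seq).length < c) :
    idxAfter seq c = seq.length := by
  induction seq generalizing c with
  | nil => cases c <;> simp [idxAfter]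
  | cons ch rest ih =>
    obtain ⟨c, rfl⟩ : ∃ c', c = c' + 1 := ⟨c - 1, by omega⟩
    simp only [idxAfter, List.length_cons]
    by_cases hc : pvCounted ch
    · simp only [upperN, hc, if_true, List.length_cons, List.length_map] at h
      rw [ih (c := if pvCounted ch then c else c + 1) (by simp [hc]; omega)]; omega
    · simp only [upperN, hc, Bool.false_eq_true, if_false, List.length_map] at h
      rw [ih (c := if pvCounted ch then c else c + 1) (by simp [hc]; omega)]; omega

theorem pvWhileA_eq (seq : List Char) (t : Int) (pos : Nat) (actual : Int) (acc : List Char)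
    (hpos : pos ≤ seq.length) :
    pvWhileA seq t pos actual acc =
      (acc ++ (seq.drop pos).take (idxAfter (seq.drop pos) ((t - actual).toNat)),
       pos + idxAfter (seq.drop pos) ((t - actual).toNat)) := by
  induction pos, actual, acc using pvWhileA.induct seq t with
  | case1 pos actual acc h ih =>
    have hdrop : seq.drop pos = seq[pos]'h.2 :: seq.drop (pos + 1) :=
      (List.getElem_cons_drop h.2).symm
    obtain ⟨k, hk⟩ : ∃ k, (t - actual).toNat = k + 1 := ⟨(t - actual - 1).toNat, by omega⟩
    rw [pvWhileA, dif_pos h]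
    simp only [dite_eq_ite] at ih
    rw [ih (by omega), hdrop]
    simp only [hk, idxAfter]
    by_cases hc : pvCounted (seq[pos]'h.2)
    · have h2 : (t - (actual + 1)).toNat = k := by omega
      simp only [hc, if_true, h2, Prod.mk.injEq]
      refine ⟨?_, by omega⟩
      rw [Nat.add_comm 1, List.take_succ_cons]
      simp
    · have h2 : (t - actual).toNat = k + 1 := hk
      simp only [hc, Bool.false_eq_true, if_false, h2, Prod.mk.injEq]
      refine ⟨?_, by omega⟩
      rw [Nat.add_comm 1, List.take_succ_cons]
      simp
  | case2 pos actual acc h =>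
    rw [pvWhileA, dif_neg h]
    rcases not_and_or.mp h with h' | h'
    · have h0 : (t - actual).toNat = 0 := by omega
      simp [h0, idxAfter]
    · have hnil : seq.drop pos = [] := List.drop_eq_nil_of_le (by omega)
      cases hn : (t - actual).toNat <;> simp [hnil, idxAfter]

theorem upper_eq (seq : List Char) :
    ((PySem.List.enumerate seq).filter (fun p => pvCounted p.2)).map (·.1)
      = List.map (fun n : Nat => (n : Int)) (upperN seq) := by
  have := upperN_enum seq 0
  simpa using this

theorem slicer_loop (seq : List Char) (lengths : List Int) (accA : List (List Char))
    (pos : Nat) (cum : Int) (hc : 0 ≤ cum) (hp : pos = idxAfter seq cum.toNat) :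
    (lengths.foldl (fun (st : List (List Char) × Nat) target_length =>
        let r := pvWhileA seq target_length st.2 0 []
        (st.1 ++ [r.1], r.2)) (accA, pos)).1
    = (lengths.foldl (fun (st : List (List Char) × Int × Int) target_length =>
        let cum := st.2.2 + max target_length 0
        let e : Int :=
          if cum = 0 then st.2.1
          else if cum ≤ ((((PySem.List.enumerate seq).filter (fun p => pvCounted p.2)).map (·.1)).length : Int)
            then PySem.List.pyGetD (((PySem.List.enumerate seq).filter (fun p => pvCounted p.2)).map (·.1)) (cum - 1) 0 + 1
          else (seq.length : Int)
        (st.1 ++ [PySem.List.slice seq (some st.2.1) (some e)], e, cum)) (accA, (pos : Int), cum)).1 := by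
  induction lengths generalizing accA pos cum with
  | nil => rfl
  | cons t rest ih =>
    simp only [List.foldl_cons]
    have hpos : pos ≤ seq.length := hp ▸ idxAfter_le seq cum.toNat
    set j := idxAfter (seq.drop pos) (t.toNat) with hj
    have hsub : (t - 0).toNat = t.toNat := by omega
    have hw : pvWhileA seq t pos 0 [] = ((seq.drop pos).take j, pos + j) := by
      rw [pvWhileA_eq seq t pos 0 [] hpos]
      simp only [List.nil_append, hsub]
      rfl
    set cum' := cum + max t 0 with hcum'
    have hc' : 0 ≤ cum' := by omega
    have htn : cum'.toNat = cum.toNat + t.toNat := by omega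
    have hpos' : pos + j = idxAfter seq cum'.toNat := by
      rw [htn, idxAfter_add, ← hp, hj]
    have hupper : ((PySem.List.enumerate seq).filter (fun p => pvCounted p.2)).map (·.1)
        = List.map (fun n : Nat => (n : Int)) (upperN seq) := upper_eq seq
    have hlen : ((((PySem.List.enumerate seq).filter (fun p => pvCounted p.2)).map (·.1)).length : Int)
        = ((upperN seq).length : Int) := by rw [hupper]; simp
    have he : (if cum' = 0 then (pos : Int)
        else if cum' ≤ ((((PySem.List.enumerate seq).filter (fun p => pvCounted p.2)).map (·.1)).length : Int)
          then PySem.List.pyGetD (((PySem.List.enumerate seq).filter (fun p => pvCounted p.2)).map (·.1)) (cum' - 1) 0 + 1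
        else (seq.length : Int)) = ((pos + j : Nat) : Int) := by
      by_cases h0 : cum' = 0
      · have h1 : cum.toNat = 0 ∧ t.toNat = 0 := by omega
        have : pos + j = pos := by
          rw [hpos', h0]; rw [hp, h1.1]; rfl
        rw [if_pos h0, this]
      · rw [if_neg h0]
        by_cases h2 : cum' ≤ ((((PySem.List.enumerate seq).filter (fun p => pvCounted p.2)).map (·.1)).length : Int)
        · rw [if_pos h2]
          rw [hlen] at h2
          have h2n : cum'.toNat ≤ (upperN seq).length := by omega
          have h1n : 1 ≤ cum'.toNat := by omega
          have hhit := idxAfter_hit seq cum'.toNat h1n h2n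
          have hidx : cum' - 1 = (((cum'.toNat - 1 : Nat) : Int)) := by omega
          rw [hupper, hidx, PySem.List.pyGetD_natCast]
          have hlt : cum'.toNat - 1 < (upperN seq).length := by omega
          rw [List.getD_eq_getElem _ _ (by simpa using hlt)]
          rw [List.getElem_map]
          rw [hpos', hhit, List.getD_eq_getElem _ _ hlt]
          push_cast; ring
        · rw [if_neg h2]
          rw [hlen] at h2
          have := idxAfter_miss seq cum'.toNat (by omega)
          rw [hpos', this]
    have hslice : PySem.List.slice seq (some (pos : Int)) (some ((pos + j : Nat) : Int))
        = (seq.drop pos).take j := by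
      rw [PySem.List.slice_natCast]
      congr 1; omega
    simp only [hw]
    rw [ih (accA ++ [(seq.drop pos).take j]) (pos + j) cum' hc' hpos']
    simp only [he, hslice]

theorem slicer_eq (seq : List Char) (lengths : List Int) :
    split_input_by_chains seq lengths = split_input_by_chains_alt seq lengths := by
  unfold split_input_by_chains split_input_by_chains_alt
  have := slicer_loop seq lengths [] 0 0 le_rfl (by simp [idxAfter])
  simpa using this

-- ===== VERDICT (by name: the statement is the Claim_ definition above) =====
theorem split_msa_vertically_spec : Claim_equal_split_msa_vertically := by
  intro chains names lines _hdom _hpre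
  unfold Spec_split_msa_vertically
  unfold split_msa_vertically split_msa_vertically_alt
  refine congrArg PySem.Dict.items ?_
  apply PySem.List.foldl_congr_mem
  intro d line _hmem
  by_cases hgt : PySem.Str.startswith line ">"
  · rw [if_pos (by simpa using hgt), if_pos (by simpa using hgt)]
  · rw [if_neg (by simpa using hgt), if_neg (by simpa using hgt)]
    rw [slicer_eq]
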